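-- pv_equiv track=rewrite | github.com/pnnv/hyprland-dotfiles | VSCodium/User/History/-77d32fd6/GtRe.py | min_score_binary_search
-- ===== SOURCE A (Python) =====
-- def can_achieve_score(s, k, target_score):
--     flips = 0
--     count = 0
--     for i in range(len(s)):
--         if i == 0 or s[i] == s[i-1]:
--             count += 1
--         else:
--             count = 1
--
--         if count == target_score:
--             flips += 1
--             count = 0
--
--     return flips <= k
--
-- def min_score_binary_search(s, k):
--     left, right = 1, len(s)
--
--     while left < right:
--         mid = (left + right) // 2
--         if can_achieve_score(s, k, mid):
--             right = mid
--         else: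
--             left = mid + 1
--
--     return left
-- ===== SOURCE B (Python) =====
-- def min_score_binary_search(s, k):
--     # Build run-length table once, then binary search with a sum of floor divisions.
--     runs = []
--     prev = None
--     c = 0
--     for ch in s:
--         if ch == prev:
--             c += 1
--         else:
--             if c:
--                 runs.append(c)
--             prev = ch
--             c = 1
--     if c:
--         runs.append(c)
--
--     left, right = 1, len(s)
--     while left < right:
--         mid = (left + right) // 2
--         if sum(L // mid for L in runs) <= k:
--             right = mid
--         else:
--             left = mid + 1
--     return left
-- ===== Notes on version B (the rewrite author's own statement) =====
-- stated objective: faster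
-- what changed: B scans s once to build a run-length table and the binary-search predicate becomes a sum of floor divisions over that table, instead of A's per-step full rescan of the string with a counter/reset loop.
import Mathlib
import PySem

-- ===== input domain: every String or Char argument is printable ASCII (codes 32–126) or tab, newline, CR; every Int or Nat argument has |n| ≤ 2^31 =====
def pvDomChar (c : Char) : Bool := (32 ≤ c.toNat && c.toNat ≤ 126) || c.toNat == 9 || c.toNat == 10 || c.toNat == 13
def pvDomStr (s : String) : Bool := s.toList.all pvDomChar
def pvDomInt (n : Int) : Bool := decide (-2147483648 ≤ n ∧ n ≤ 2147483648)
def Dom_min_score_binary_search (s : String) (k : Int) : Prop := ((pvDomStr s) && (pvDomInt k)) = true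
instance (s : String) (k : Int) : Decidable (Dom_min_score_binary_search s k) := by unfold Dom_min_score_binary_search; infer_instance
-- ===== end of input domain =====

-- B builds a run-length table once and the binary-search check sums floor divisions over it,
-- instead of rescanning the whole string on every binary-search step (objective: faster).

-- ===== PORT A =====
-- s[i] / s[i-1]: the loop only reads indices 0 ≤ i < len(s) (and i-1 only when i ≠ 0),
-- so List.getD is exact here (never hits the default).
def can_achieve_score (s : String) (k : Int) (target_score : Int) : Bool :=
  let cs := s.toList
  let st := (List.range cs.length).foldl
    (fun (p : Int × Int) (i : Nat) =>
      let count : Int := if i = 0 ∨ cs.getD i ' ' = cs.getD (i - 1) ' ' then p.2 + 1 else 1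
      if count = target_score then (p.1 + 1, (0 : Int)) else (p.1, count))
    ((0 : Int), (0 : Int))
  decide (st.1 ≤ k)

def msLoopA (s : String) (k : Int) (fuel : Nat) (left right : Int) : Int :=
  -- while left < right — fuel ≥ right - left at every entry, so the guard below never cuts the loop short
  match fuel with
  | 0 => left
  | fuel + 1 =>
    if left < right then
      let mid := PySem.Int.floordiv (left + right) 2
      if can_achieve_score s k mid then msLoopA s k fuel left mid
      else msLoopA s k fuel (mid + 1) right
    else left

def min_score_binary_search (s : String) (k : Int) : Int :=
  msLoopA s k s.toList.length 1 (s.toList.length : Int)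

-- ===== PORT B =====
-- one pass over s building the maximal-run lengths (Python's for ch in s / append)
def runsOf (cs : List Char) : List Int :=
  let st := cs.foldl
    (fun (st : List Int × Option Char × Int) ch =>
      if some ch = st.2.1 then (st.1, st.2.1, st.2.2 + 1)
      else ((if st.2.2 ≠ 0 then st.1 ++ [st.2.2] else st.1), some ch, 1))
    ([], none, 0)
  if st.2.2 ≠ 0 then st.1 ++ [st.2.2] else st.1

-- sum(L // mid for L in runs) <= k
def fitsB (runs : List Int) (k : Int) (mid : Int) : Bool :=
  decide ((runs.foldl (fun a L => a + PySem.Int.floordiv L mid) 0) ≤ k)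

def msLoopB (runs : List Int) (k : Int) (fuel : Nat) (left right : Int) : Int :=
  -- while left < right — same fuel guard as msLoopA, never reached before the loop exits
  match fuel with
  | 0 => left
  | fuel + 1 =>
    if left < right then
      let mid := PySem.Int.floordiv (left + right) 2
      if fitsB runs k mid then msLoopB runs k fuel left mid
      else msLoopB runs k fuel (mid + 1) right
    else left

def min_score_binary_search_alt (s : String) (k : Int) : Int :=
  msLoopB (runsOf s.toList) k s.toList.length 1 (s.toList.length : Int)

-- ===== PRECONDITION & SPEC =====
def Spec_min_score_binary_search (s : String) (k : Int) (out : Int) : Prop := out = min_score_binary_search_alt s k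
instance (s : String) (k : Int) (out : Int) : Decidable (Spec_min_score_binary_search s k out) := by unfold Spec_min_score_binary_search; infer_instance

-- ===== CLAIM (what is proved, stated in full; the proofs are below) =====
def Claim_equal_min_score_binary_search : Prop := ∀ (s : String) (k : Int), Dom_min_score_binary_search s k → Spec_min_score_binary_search s k (min_score_binary_search s k)

-- ===== LEMMAS AND PROOFS =====

-- A's loop body, named (identical to the lambda in can_achieve_score)
def stepA (cs : List Char) (t : Int) (p : Int × Int) (i : Nat) : Int × Int :=
  let count : Int := if i = 0 ∨ cs.getD i ' ' = cs.getD (i - 1) ' ' then p.2 + 1 else 1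
  if count = t then (p.1 + 1, (0 : Int)) else (p.1, count)

-- reference recursion: A's loop re-expressed over the suffix, carrying the previous char
def recA (t : Int) : List Char → Option Char → Int × Int → Int × Int
  | [], _, st => st
  | ch :: rest, prev, st =>
    let count : Int := match prev with
      | none => st.2 + 1
      | some p => if ch = p then st.2 + 1 else 1
    if count = t then recA t rest (some ch) (st.1 + 1, 0)
    else recA t rest (some ch) (st.1, count)

-- B's loop body and finish, named
def stepB (st : List Int × Option Char × Int) (ch : Char) : List Int × Option Char × Int :=
  if some ch = st.2.1 then (st.1, st.2.1, st.2.2 + 1)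
  else ((if st.2.2 ≠ 0 then st.1 ++ [st.2.2] else st.1), some ch, 1)

def finishB (st : List Int × Option Char × Int) : List Int :=
  if st.2.2 ≠ 0 then st.1 ++ [st.2.2] else st.1

def sumF (runs : List Int) (t : Int) : Int :=
  runs.foldl (fun a L => a + PySem.Int.floordiv L t) 0

lemma can_eq (s : String) (k t : Int) :
    can_achieve_score s k t
      = decide (((List.range s.toList.length).foldl (stepA s.toList t) (0, 0)).1 ≤ k) := rfl

lemma runsOf_eq (cs : List Char) : runsOf cs = finishB (cs.foldl stepB ([], none, 0)) := rfl

lemma fitsB_eq (runs : List Int) (k t : Int) :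
    fitsB runs k t = decide (sumF runs t ≤ k) := rfl

lemma sumF_append (runs : List Int) (c t : Int) :
    sumF (runs ++ [c]) t = sumF runs t + PySem.Int.floordiv c t := by
  simp only [sumF, List.foldl_append, List.foldl_cons, List.foldl_nil]

-- A's index loop equals the previous-char recursion
lemma foldA (t : Int) :
    ∀ (cur pre : List Char) (st : Int × Int),
      (List.range' pre.length cur.length).foldl (stepA (pre ++ cur) t) st
        = recA t cur pre.getLast? st := by
  intro cur
  induction cur with
  | nil => intro pre st; simp [recA]
  | cons ch rest ih =>
    intro pre st
    rw [List.length_cons, List.range'_succ, List.foldl_cons]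
    have hget : (pre ++ ch :: rest).getD pre.length ' ' = ch := by
      simp [List.getD]
    have hstep : stepA (pre ++ ch :: rest) t st pre.length
        = (if (match pre.getLast? with
             | none => st.2 + 1
             | some p => if ch = p then st.2 + 1 else 1) = t
           then ((st.1 + 1 : Int), (0 : Int))
           else (st.1, (match pre.getLast? with
             | none => st.2 + 1
             | some p => if ch = p then st.2 + 1 else 1))) := by
      cases hpre : pre.getLast? with
      | none =>
        have : pre = [] := by
          cases pre with
          | nil => rfl
          | cons a as => simp [List.getLast?_eq_getElem?] at hpre
        subst this
        simp [stepA]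
      | some p =>
        have hne : pre ≠ [] := by
          intro h; subst h; simp at hpre
        have hlen : 1 ≤ pre.length := by
          cases pre with
          | nil => exact absurd rfl hne
          | cons a as => simp
        have hprev : (pre ++ ch :: rest).getD (pre.length - 1) ' ' = p := by
          have h1 : pre.length - 1 < pre.length := by omega
          have h2 : (pre ++ ch :: rest)[pre.length - 1]? = pre[pre.length - 1]? :=
            List.getElem?_append_left h1
          simp only [List.getD, h2]
          rw [← List.getLast?_eq_getElem?, hpre]; rfl
        simp only [stepA, hget, hprev]
        have h0 : ¬ pre.length = 0 := by omega
        simp only [h0, false_or]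
    rw [hstep]
    simp only [recA]
    have harr : pre ++ ch :: rest = (pre ++ [ch]) ++ rest := by simp
    have hlen2 : pre.length + 1 = (pre ++ [ch]).length := by simp
    by_cases hc : (match pre.getLast? with
        | none => st.2 + 1
        | some p => if ch = p then st.2 + 1 else 1) = t
    · rw [if_pos hc, harr, hlen2, ih (pre ++ [ch]) (st.1 + 1, 0), List.getLast?_concat, if_pos hc]
    · rw [if_neg hc, harr, hlen2, ih (pre ++ [ch]) _, List.getLast?_concat, if_neg hc]

-- arithmetic: extending the current run by one character
lemma div_mod_succ (c t : Int) (hc : 0 ≤ c) (ht : 1 ≤ t) :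
    ((c % t + 1 = t → (c + 1) / t = c / t + 1 ∧ (c + 1) % t = 0) ∧
     (c % t + 1 ≠ t → (c + 1) / t = c / t ∧ (c + 1) % t = c % t + 1)) := by
  have h0 : 0 < t := by omega
  have hmn : 0 ≤ c % t := Int.emod_nonneg c (by omega)
  have hml : c % t < t := Int.emod_lt_of_pos c h0
  have hdm : t * (c / t) + c % t = c := Int.mul_ediv_add_emod c t
  constructor
  · intro hfull
    refine (Int.ediv_emod_unique h0).2 ⟨?_, le_refl 0, h0⟩
    rw [mul_add, mul_one]; omega
  · intro hnf
    exact (Int.ediv_emod_unique h0).2 ⟨by omega, by omega, by omega⟩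

lemma floordiv_zero_t (t : Int) : PySem.Int.floordiv 0 t = 0 := by
  simp [PySem.Int.floordiv, Int.fdiv]

lemma floordiv_nonneg_eq (c t : Int) (hc : 0 ≤ c) (ht : 1 ≤ t) :
    PySem.Int.floordiv c t = c / t :=
  PySem.Int.floordiv_eq_ediv_of_pos (by omega)

-- the key invariant: A's flip count is the sum of floor divisions over B's run table
lemma key (t : Int) (ht : 1 ≤ t) :
    ∀ (cs : List Char) (prev : Option Char) (runs : List Int) (c : Int),
      0 ≤ c → (prev = none → c = 0) →
      (recA t cs prev (sumF runs t + PySem.Int.floordiv c t, c % t)).1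
        = sumF (finishB (cs.foldl stepB (runs, prev, c))) t := by
  intro cs
  induction cs with
  | nil =>
    intro prev runs c hcnn _
    simp only [recA, List.foldl_nil, finishB]
    by_cases h : c = 0
    · subst h; simp [floordiv_zero_t]

    · simp only [h, ne_eq, not_false_eq_true, if_pos]
      rw [sumF_append]
  | cons ch rest ih =>
    intro prev runs c hc hpn
    -- unified handling of "start a new run with run table runs' and current length 1"
    have hnew : ∀ (runs' : List Int) (f : Int),
        sumF runs' t = f →
        (if (1 : Int) = t then recA t rest (some ch) (f + 1, 0)
         else recA t rest (some ch) (f, 1)).1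
          = sumF (finishB (rest.foldl stepB (runs', some ch, 1))) t := by
      intro runs' f hr'
      have hih := ih (some ch) runs' 1 (by omega) (by intro h; cases h)
      by_cases h1 : (1 : Int) = t
      · have hd : PySem.Int.floordiv 1 t = 1 := by
          rw [floordiv_nonneg_eq 1 t (by omega) ht, ← h1]; rfl
        have hm : (1 : Int) % t = 0 := by rw [← h1]; rfl
        rw [if_pos h1, ← hr']
        rw [hd, hm] at hih
        exact hih
      · have hd : PySem.Int.floordiv 1 t = 0 := by
          rw [floordiv_nonneg_eq 1 t (by omega) ht]
          exact Int.ediv_eq_zero_of_lt (by omega) (by omega)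
        have hm : (1 : Int) % t = 1 := Int.emod_eq_of_lt (by omega) (by omega)
        rw [if_neg h1, ← hr']
        rw [hd, hm, add_zero] at hih
        exact hih
    cases prev with
    | none =>
      have hc0 : c = 0 := hpn rfl
      subst hc0
      have hsb : stepB (runs, none, (0 : Int)) ch = (runs, some ch, 1) := by
        simp [stepB]
      simp only [List.foldl_cons, hsb, recA, floordiv_zero_t, add_zero, Int.zero_emod,
        zero_add]
      exact hnew runs (sumF runs t) rfl
    | some p =>
      by_cases hchp : ch = p
      · -- run continues
        subst hchp
        have hsb : stepB (runs, some ch, c) ch = (runs, some ch, c + 1) := by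
          simp [stepB]
        have hih := ih (some ch) runs (c + 1) (by omega) (by intro h; cases h)
        rw [floordiv_nonneg_eq (c + 1) t (by omega) ht] at hih
        simp only [List.foldl_cons, hsb, recA, ite_true,
          floordiv_nonneg_eq c t hc ht]
        by_cases hfull : c % t + 1 = t
        · obtain ⟨hd, hm⟩ := (div_mod_succ c t hc ht).1 hfull
          rw [if_pos hfull]
          rw [hd, hm, ← add_assoc] at hih
          exact hih
        · obtain ⟨hd, hm⟩ := (div_mod_succ c t hc ht).2 hfull
          rw [if_neg hfull]
          rw [hd, hm] at hih
          exact hih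
      · -- a new run starts
        have hsb : stepB (runs, some p, c) ch
            = ((if c ≠ 0 then runs ++ [c] else runs), some ch, 1) := by
          simp [stepB, hchp]
        simp only [List.foldl_cons, hsb, recA, if_neg hchp]
        refine hnew (if c ≠ 0 then runs ++ [c] else runs)
          (sumF runs t + PySem.Int.floordiv c t) ?_
        by_cases hc0 : c = 0
        · subst hc0; simp [floordiv_zero_t]
        · simp only [hc0, ne_eq, not_false_eq_true, if_pos]
          exact sumF_append runs c t

-- the two binary-search predicates agree for every mid ≥ 1
lemma pred_eq (s : String) (k t : Int) (ht : 1 ≤ t) :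
    can_achieve_score s k t = fitsB (runsOf s.toList) k t := by
  rw [can_eq, fitsB_eq, runsOf_eq]
  have h1 : (List.range s.toList.length).foldl (stepA s.toList t) (0, 0)
      = recA t s.toList none (0, 0) := by
    have h := foldA t s.toList [] (0, 0)
    simpa [List.range_eq_range'] using h
  have h2 := key t ht s.toList none [] 0 (le_refl 0) (fun _ => rfl)
  rw [h1]
  have hz : recA t s.toList none (sumF [] t + PySem.Int.floordiv 0 t, (0 : Int) % t)
      = recA t s.toList none (0, 0) := by
    simp [sumF, floordiv_zero_t]
  rw [hz] at h2
  rw [h2]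

-- the two binary searches coincide step for step
lemma loop_eq (s : String) (k : Int) :
    ∀ (fuel : Nat) (l r : Int), (r - l).toNat ≤ fuel → 1 ≤ l →
      msLoopA s k fuel l r = msLoopB (runsOf s.toList) k fuel l r := by
  intro fuel
  induction fuel with
  | zero => intro l r _ _; rfl
  | succ m ih =>
    intro l r hn hl
    simp only [msLoopA, msLoopB]
    by_cases h : l < r
    · simp only [if_pos h]
      have hmid : PySem.Int.floordiv (l + r) 2 = (l + r) / 2 :=
        PySem.Int.floordiv_eq_ediv_of_pos (by omega)
      have hb1 : l ≤ PySem.Int.floordiv (l + r) 2 := by rw [hmid]; omega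
      have hb2 : PySem.Int.floordiv (l + r) 2 < r := by rw [hmid]; omega
      have hm1 : 1 ≤ PySem.Int.floordiv (l + r) 2 := by omega
      rw [pred_eq s k _ hm1]
      by_cases hp : fitsB (runsOf s.toList) k (PySem.Int.floordiv (l + r) 2) = true
      · rw [if_pos hp, if_pos hp]
        exact ih l _ (by omega) hl
      · rw [if_neg hp, if_neg hp]
        exact ih _ r (by omega) (by omega)
    · simp only [if_neg h]

-- ===== VERDICT (by name: the statement is the Claim_ definition above) =====
theorem min_score_binary_search_spec : Claim_equal_min_score_binary_search := by
  intro s k _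
  unfold Spec_min_score_binary_search min_score_binary_search min_score_binary_search_alt
  exact loop_eq s k s.toList.length 1 _ (by omega) (le_refl 1)
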